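-- pv_equiv track=rewrite | github.com/Vidyasagar-Dadilwar/gfg | Difficulty: Medium/Exactly one swap/exactly-one-swap.py | countStrings
-- ===== SOURCE A (Python) =====
-- from collections import Counter
--
-- def countStrings(s):
--     d=Counter(s)
--     ans=0
--     n=len(s)
--     for i in d.values():
--         if i>1:
--             ans+=(i*(i-1))//2
--     res=(n*(n-1))//2 - ans
--     if ans>0:
--         res+=1
--     return res
-- ===== SOURCE B (Python) =====
-- from collections import Counter
--
-- def countStrings(s):
--     # one pass over the distinct-character counts: sum of products of counts
--     # of distinct character types, plus 1 if any character repeats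
--     ans = 0
--     seen = 0
--     dup = False
--     for c in Counter(s).values():
--         ans += c * seen
--         seen += c
--         dup = dup or c > 1
--     return ans + 1 if dup else ans
-- ===== Notes on version B (the rewrite author's own statement) =====
-- stated objective: alternative
-- what changed: Instead of computing C(n,2) and subtracting the same-character pair counts C(c,2), B makes one running-total pass over the distinct counts summing c*seen (the cross products of distinct character types) and adds 1 if any character repeats.
import Mathlib
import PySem

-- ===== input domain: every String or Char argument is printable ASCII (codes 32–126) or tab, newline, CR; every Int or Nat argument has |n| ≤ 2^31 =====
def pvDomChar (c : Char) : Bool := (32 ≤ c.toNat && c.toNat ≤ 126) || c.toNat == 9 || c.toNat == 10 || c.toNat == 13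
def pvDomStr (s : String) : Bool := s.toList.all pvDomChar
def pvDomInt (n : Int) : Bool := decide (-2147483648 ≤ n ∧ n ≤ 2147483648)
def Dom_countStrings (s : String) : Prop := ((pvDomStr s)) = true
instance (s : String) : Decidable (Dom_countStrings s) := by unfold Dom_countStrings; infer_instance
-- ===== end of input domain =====

-- B replaces A's "C(n,2) minus same-character pairs" arithmetic by a single running-total
-- pass over the distinct counts (sum of cross products) plus a repeat flag; same cost.

-- ===== PORT A =====
def countStrings (s : String) : Int :=
  let d := PySem.Dict.counter s.toList
  let ans := d.values.foldl (fun ans i => if i > 1 then ans + PySem.Int.floordiv (i * (i - 1)) 2 else ans) 0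
  let n : Int := PySem.Str.len s
  let res := PySem.Int.floordiv (n * (n - 1)) 2 - ans
  if ans > 0 then res + 1 else res

-- ===== PORT B =====
def countStrings_alt (s : String) : Int :=
  let st := (PySem.Dict.counter s.toList).values.foldl
    (fun (st : Int × Int × Bool) c => (st.1 + c * st.2.1, st.2.1 + c, st.2.2 || decide (c > 1)))
    (0, 0, false)
  if st.2.2 then st.1 + 1 else st.1

-- ===== PRECONDITION & SPEC =====
def Spec_countStrings (s : String) (out : Int) : Prop := out = countStrings_alt s
instance (s : String) (out : Int) : Decidable (Spec_countStrings s out) := by unfold Spec_countStrings; infer_instance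

-- ===== CLAIM (what is proved, stated in full; the proofs are below) =====
def Claim_equal_countStrings : Prop := ∀ (s : String), Dom_countStrings s → Spec_countStrings s (countStrings s)

-- ===== LEMMAS AND PROOFS =====

-- A's per-count contribution
def aTerm (i : Int) : Int := if i > 1 then PySem.Int.floordiv (i * (i - 1)) 2 else 0

-- B's accumulated sum of cross products Σ_{i<j} v_i v_j
def bCross : List Int → Int
  | [] => 0
  | v :: vs => v * vs.sum + bCross vs

lemma aFold_eq (vs : List Int) : ∀ a0 : Int,
    vs.foldl (fun ans i => if i > 1 then ans + PySem.Int.floordiv (i * (i - 1)) 2 else ans) a0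
      = a0 + (vs.map aTerm).sum := by
  induction vs with
  | nil => intro a0; simp
  | cons v vs ih =>
      intro a0
      simp only [List.foldl_cons, List.map_cons, List.sum_cons, ih, aTerm]
      split <;> ring

lemma bFold_eq (vs : List Int) : ∀ (a sn : Int) (d : Bool),
    vs.foldl (fun (st : Int × Int × Bool) c => (st.1 + c * st.2.1, st.2.1 + c, st.2.2 || decide (c > 1)))
      (a, sn, d)
      = (a + sn * vs.sum + bCross vs, sn + vs.sum, d || vs.any (fun c => decide (c > 1))) := by
  induction vs with
  | nil => intro a sn d; simp [bCross]
  | cons v vs ih =>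
      intro a sn d
      simp only [List.foldl_cons, ih, List.sum_cons, List.any_cons, bCross]
      refine Prod.ext (by ring) (Prod.ext (by ring) ?_)
      simp [Bool.or_assoc]

lemma fdiv_even (k : Int) : PySem.Int.floordiv (2 * k) 2 = k := by
  show Int.fdiv (2 * k) 2 = k
  rw [Int.mul_fdiv_cancel_left _ (by norm_num)]

lemma consec_even (n : Int) : ∃ k, n * (n - 1) = 2 * k := by
  rcases Int.even_or_odd n with ⟨k, hk⟩ | ⟨k, hk⟩
  · exact ⟨k * (n - 1), by rw [hk]; ring⟩
  · exact ⟨n * k, by rw [hk]; ring⟩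

lemma two_aTerm (i : Int) (hi : 1 ≤ i) : 2 * aTerm i = i * (i - 1) := by
  unfold aTerm
  split
  · obtain ⟨k, hk⟩ := consec_even i
    rw [hk, fdiv_even]
  · interval_cases i; norm_num

lemma aTerm_nonneg (i : Int) (hi : 1 ≤ i) : 0 ≤ aTerm i := by
  have := two_aTerm i hi; nlinarith

lemma aTerm_pos (i : Int) (hi : 1 < i) : 0 < aTerm i := by
  have := two_aTerm i (le_of_lt hi); nlinarith

-- 2·(Σ aTerm) = Σ v² − Σ v, for positive counts
lemma two_sum_aTerm (vs : List Int) (h : ∀ v ∈ vs, 1 ≤ v) :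
    2 * (vs.map aTerm).sum = (vs.map (fun v => v * v)).sum - vs.sum := by
  induction vs with
  | nil => simp
  | cons v vs ih =>
      have hv := h v (by simp)
      have := ih (fun v hv => h v (by simp [hv]))
      simp only [List.map_cons, List.sum_cons]
      have := two_aTerm v hv
      linarith

-- 2·bCross = (Σ v)² − Σ v²
lemma two_bCross (vs : List Int) : 2 * bCross vs = vs.sum * vs.sum - (vs.map (fun v => v * v)).sum := by
  induction vs with
  | nil => simp [bCross]
  | cons v vs ih =>
      simp only [bCross, List.sum_cons, List.map_cons]
      nlinarith [ih]

lemma sum_aTerm_nonneg (vs : List Int) (h : ∀ v ∈ vs, 1 ≤ v) : 0 ≤ (vs.map aTerm).sum := by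
  induction vs with
  | nil => simp
  | cons v vs ih =>
      have := aTerm_nonneg v (h v (by simp))
      have := ih (fun v hv => h v (by simp [hv]))
      simp only [List.map_cons, List.sum_cons]
      linarith

lemma sum_aTerm_pos_iff (vs : List Int) (h : ∀ v ∈ vs, 1 ≤ v) :
    0 < (vs.map aTerm).sum ↔ vs.any (fun c => decide (c > 1)) = true := by
  induction vs with
  | nil => simp
  | cons v vs ih =>
      have hv := h v (by simp)
      have htail : ∀ v ∈ vs, 1 ≤ v := fun v hv => h v (by simp [hv])
      have ih' := ih htail
      have hnn := sum_aTerm_nonneg vs htail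
      simp only [List.map_cons, List.sum_cons, List.any_cons, Bool.or_eq_true, decide_eq_true_eq]
      constructor
      · intro hpos
        by_cases hv1 : 1 < v
        · exact Or.inl hv1
        · have : aTerm v = 0 := by unfold aTerm; simp [hv1]
          exact Or.inr (ih'.mp (by linarith))
      · rintro (hv1 | hany)
        · have := aTerm_pos v hv1; linarith
        · have := ih'.mpr hany
          have := aTerm_nonneg v hv
          linarith

-- the values of Counter(xs): each count is ≥ 1 and they sum to len(xs)
lemma counter_values_eq (xs : List Char) :
    (PySem.Dict.counter xs).values = (PySem.Set.ofList xs).map (fun k => (xs.count k : Int)) := by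
  show ((PySem.Dict.counter xs).items).map (·.2) = _
  rw [PySem.Dict.items_counter]
  simp [List.map_map, Function.comp]

lemma counter_values_pos (xs : List Char) :
    ∀ v ∈ (PySem.Dict.counter xs).values, 1 ≤ v := by
  rw [counter_values_eq]
  intro v hv
  simp only [List.mem_map] at hv
  obtain ⟨k, hk, rfl⟩ := hv
  have hmem : k ∈ xs := (PySem.Set.mem_ofList xs k).mp hk
  have : 1 ≤ xs.count k := List.count_pos_iff.mpr hmem
  exact_mod_cast this

lemma counter_values_sum (xs : List Char) :
    (PySem.Dict.counter xs).values.sum = (xs.length : Int) := by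
  rw [counter_values_eq]
  have hperm : (PySem.Set.ofList xs : List Char).Perm xs.dedup := by
    apply (List.perm_ext_iff_of_nodup (PySem.Set.nodup_ofList xs) xs.nodup_dedup).mpr
    intro a
    simp [PySem.Set.mem_ofList, List.mem_dedup]
  rw [(hperm.map (fun k => (xs.count k : Int))).sum_eq]
  have hnat : (xs.dedup.map fun x => xs.count x).sum = xs.length :=
    List.sum_map_count_dedup_eq_length xs
  calc (xs.dedup.map fun k => (xs.count k : Int)).sum
      = ((xs.dedup.map fun x => xs.count x).sum : Int) := by
        rw [Nat.cast_list_sum, List.map_map]; rfl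
    _ = (xs.length : Int) := by rw [hnat]

-- ===== VERDICT (by name: the statement is the Claim_ definition above) =====
theorem countStrings_spec : Claim_equal_countStrings := by
  unfold Claim_equal_countStrings Spec_countStrings
  intro s _
  unfold countStrings countStrings_alt
  simp only [aFold_eq, bFold_eq, zero_add, zero_mul, add_zero, Bool.false_or, PySem.Str.len_eq]
  set xs := s.toList with hxs
  set vs := (PySem.Dict.counter xs).values with hvs
  set n : Int := (xs.length : Int) with hn
  have hpos := counter_values_pos xs
  have hsum : vs.sum = n := counter_values_sum xs
  have h2a := two_sum_aTerm vs hpos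
  have h2b := two_bCross vs
  rw [hsum] at h2a h2b
  have hF : 2 * PySem.Int.floordiv (n * (n - 1)) 2 = n * n - n := by
    obtain ⟨k, hk⟩ := consec_even n
    rw [hk, fdiv_even]
    linear_combination -hk
  have hFQ : PySem.Int.floordiv (n * (n - 1)) 2 - (vs.map aTerm).sum = bCross vs := by
    linarith
  have hiff := sum_aTerm_pos_iff vs hpos
  by_cases hany : vs.any (fun c => decide (c > 1)) = true
  · have hQ : 0 < (vs.map aTerm).sum := hiff.mpr hany
    simp only [hany, if_pos hQ, if_true]
    linarith
  · have hQ : ¬ 0 < (vs.map aTerm).sum := fun hp => hany (hiff.mp hp)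
    simp only [eq_false_of_ne_true hany, if_neg hQ, if_false, Bool.false_eq_true]
    linarith
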